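-- pv_equiv track=rewrite | github.com/aliyun/alibabacloud-aiops-skills | skills/analyticscomputing/odps/alibabacloud-odps-maxframe-coding/scripts/lookup_operator.py | _extract_header_section
-- ===== SOURCE A (Python) =====
-- from typing import Dict, List, Optional
--
-- def _extract_header_section(lines: List[str], headers: List[str]) -> str:
--     """Extract a section that starts with a header."""
--     result = []
--     in_section = False
--
--     for i, line in enumerate(lines):
--         stripped = line.strip()
--
--         # Check for section start
--         if not in_section:
--             for header in headers:
--                 if stripped in [f"### {header}", f"#### {header}", f"# {header}", header]:
--                     in_section = True
--                     break
--             continue  # Don't include the header line itself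
--
--         if in_section:
--             # Stop at next header section (### or #### that doesn't contain function signature)
--             if stripped.startswith("### ") or stripped.startswith("#### "):
--                 # But don't stop at code block headers
--                 if "(" not in stripped and not stripped.startswith("```"):
--                     break
--             result.append(line)
--
--     return "\n".join(result).strip()
-- ===== SOURCE B (Python) =====
-- def _extract_header_section(lines, headers):
--     """Backward index scan: precompute the header-variant set, walk the lines
--     from the end maintaining the index of the next section-stop line, and
--     remember the slice bounds for the leftmost matching header."""
--     variants = {v for h in headers for v in (f"### {h}", f"#### {h}", f"# {h}", h)}
--     n = len(lines)
--     stop = n          # index of the first stop line strictly after position i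
--     sec = None        # (start, end) slice bounds of the section, leftmost header wins
--     for i in range(n - 1, -1, -1):
--         s = lines[i].strip()
--         if s in variants:
--             sec = (i + 1, stop)
--         if (s.startswith("### ") or s.startswith("#### ")) and "(" not in s:
--             stop = i
--     if sec is None:
--         return ""
--     return "\n".join(lines[sec[0]:sec[1]]).strip()
-- ===== Notes on version B (the rewrite author's own statement) =====
-- stated objective: alternative
-- what changed: Replaces A's forward flag-driven pass that accumulates section lines by a backward index scan that precomputes the header-variant set, maintains the index of the next stop line, records slice bounds for the leftmost header, and returns one slice (and drops the provably redundant ``` guard).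
import Mathlib
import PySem

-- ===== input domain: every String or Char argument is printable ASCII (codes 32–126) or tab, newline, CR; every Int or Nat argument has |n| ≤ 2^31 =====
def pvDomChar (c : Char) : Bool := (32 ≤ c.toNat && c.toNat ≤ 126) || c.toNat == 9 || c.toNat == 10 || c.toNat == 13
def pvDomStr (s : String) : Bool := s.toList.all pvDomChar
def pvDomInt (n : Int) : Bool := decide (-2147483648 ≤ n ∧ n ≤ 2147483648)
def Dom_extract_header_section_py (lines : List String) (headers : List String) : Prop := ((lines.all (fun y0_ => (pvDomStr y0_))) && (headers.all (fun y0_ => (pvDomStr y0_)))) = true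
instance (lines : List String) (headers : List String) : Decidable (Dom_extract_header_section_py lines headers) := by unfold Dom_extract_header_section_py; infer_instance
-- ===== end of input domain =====

-- B replaces A's forward flag+accumulator pass by a backward index scan with a precomputed
-- header-variant set and slice bounds (alternative decomposition; same return value).

-- ===== PORT A =====
-- stripped in [f"### {header}", f"#### {header}", f"# {header}", header] for some header (for-loop with break = any)
def pvHeadA (headers : List String) (s : List Char) : Bool :=
  headers.any (fun h =>
    s == "### ".toList ++ h.toList || s == "#### ".toList ++ h.toList ||
    s == "# ".toList ++ h.toList || s == h.toList)

-- the break condition inside the section, including A's redundant ``` guard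
def pvStopA (s : List Char) : Bool :=
  (PySem.Chars.startswith s "### ".toList || PySem.Chars.startswith s "#### ".toList) &&
  (!PySem.Chars.isIn "(".toList s && !PySem.Chars.startswith s "```".toList)

-- A's loop: state = (in_section, result accumulator); break returns the accumulated lines
def pvLoopA (headers : List String) : List String → Bool → List String → List String
  | [], _, res => res.reverse
  | l :: rest, inSec, res =>
    if inSec = false then
      pvLoopA headers rest (pvHeadA headers (PySem.Chars.strip l.toList)) res
    else if pvStopA (PySem.Chars.strip l.toList) then res.reverse
    else pvLoopA headers rest true (l :: res)

def extract_header_section_py (lines : List String) (headers : List String) : String :=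
  PySem.Str.strip (PySem.Str.join "\n" (pvLoopA headers lines false []))

-- ===== PORT B =====
-- variants = {f"### {h}", f"#### {h}", f"# {h}", h  for h in headers}
def pvVariants (headers : List String) : PySem.Set (List Char) :=
  PySem.Set.ofList (headers.flatMap (fun h =>
    ["### ".toList ++ h.toList, "#### ".toList ++ h.toList, "# ".toList ++ h.toList, h.toList]))

def pvStopB (s : List Char) : Bool :=
  (PySem.Chars.startswith s "### ".toList || PySem.Chars.startswith s "#### ".toList) &&
  !PySem.Chars.isIn "(".toList s

-- the backward for-loop over range(n-1, -1, -1): first argument counts how many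
-- leading indices remain; state = (stop, sec) exactly as in Source B
def pvLoopB (lines : List String) (variants : PySem.Set (List Char)) :
    Nat → Nat → Option (Nat × Nat) → Option (Nat × Nat)
  | 0, _, sec => sec
  | i + 1, stop, sec =>
    let s := PySem.Chars.strip (lines.getD i "").toList
    let sec' := if PySem.Set.contains variants s then some (i + 1, stop) else sec
    let stop' := if pvStopB s then i else stop
    pvLoopB lines variants i stop' sec'

def extract_header_section_py_alt (lines : List String) (headers : List String) : String :=
  let n := lines.length
  match pvLoopB lines (pvVariants headers) n n none with
  | none => ""
  | some (a, b) =>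
    PySem.Str.strip (PySem.Str.join "\n"
      (PySem.List.slice lines (some (a : Int)) (some (b : Int))))

-- ===== PRECONDITION & SPEC =====
def Spec_extract_header_section_py (lines : List String) (headers : List String) (out : String) : Prop := out = extract_header_section_py_alt lines headers
instance (lines : List String) (headers : List String) (out : String) : Decidable (Spec_extract_header_section_py lines headers out) := by unfold Spec_extract_header_section_py; infer_instance

-- ===== CLAIM (what is proved, stated in full; the proofs are below) =====
def Claim_equal_extract_header_section_py : Prop := ∀ (lines : List String) (headers : List String), Dom_extract_header_section_py lines headers → Spec_extract_header_section_py lines headers (extract_header_section_py lines headers)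

-- ===== LEMMAS AND PROOFS =====

-- A's ``` guard is redundant: a line starting with "### "/"#### " cannot start with "```"
theorem pvStopA_eq_pvStopB (s : List Char) : pvStopA s = pvStopB s := by
  unfold pvStopA pvStopB
  cases hb : PySem.Chars.startswith s "```".toList
  · simp
  · have hpre : "```".toList <+: s := (PySem.Chars.startswith_iff _ _).1 hb
    cases h3 : PySem.Chars.startswith s "### ".toList
    · cases h4 : PySem.Chars.startswith s "#### ".toList
      · simp
      · have : "#### ".toList <+: s := (PySem.Chars.startswith_iff _ _).1 h4
        obtain ⟨t1, h1⟩ := hpre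
        obtain ⟨t2, h2⟩ := this
        rw [← h2] at h1
        simp at h1
    · have : "### ".toList <+: s := (PySem.Chars.startswith_iff _ _).1 h3
      obtain ⟨t1, h1⟩ := hpre
      obtain ⟨t2, h2⟩ := this
      rw [← h2] at h1
      simp at h1

-- membership in the precomputed variant set = A's inner header loop
theorem contains_variants (headers : List String) (s : List Char) :
    PySem.Set.contains (pvVariants headers) s = pvHeadA headers s := by
  rw [← Bool.coe_iff_coe]
  unfold pvVariants pvHeadA
  rw [PySem.Set.contains_iff, PySem.Set.mem_ofList]
  simp only [List.mem_flatMap, List.any_eq_true, List.mem_cons,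
    Bool.or_eq_true, beq_iff_eq]
  constructor
  · rintro ⟨h, hh, hc⟩
    exact ⟨h, hh, by tauto⟩
  · rintro ⟨h, hh, hc⟩
    exact ⟨h, hh, by tauto⟩

-- proof-side spec: index of the first stop line at or after i (n if none)
def pvFS (lines : List String) (i : Nat) : Nat :=
  match (lines.drop i).findIdx? (fun l => pvStopA (PySem.Chars.strip l.toList)) with
  | none => lines.length
  | some j => i + j

-- proof-side spec: slice bounds of the section for the suffix starting at i
def pvSec (lines headers : List String) (i : Nat) : Option (Nat × Nat) :=
  match (lines.drop i).findIdx? (fun l => pvHeadA headers (PySem.Chars.strip l.toList)) with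
  | none => none
  | some k => some (i + k + 1, pvFS lines (i + k + 1))

theorem pvFS_step (lines : List String) (i : Nat) (hi : i < lines.length) :
    pvFS lines i =
      if pvStopA (PySem.Chars.strip lines[i].toList) then i else pvFS lines (i + 1) := by
  unfold pvFS
  rw [List.drop_eq_getElem_cons hi, List.findIdx?_cons]
  by_cases h : pvStopA (PySem.Chars.strip lines[i].toList) = true
  · simp [h]
  · simp only [Bool.not_eq_true] at h
    simp only [h, Bool.false_eq_true, if_false]
    cases hf : (lines.drop (i + 1)).findIdx? (fun l => pvStopA (PySem.Chars.strip l.toList)) with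
    | none => simp
    | some j => simp; omega

theorem pvSec_step (lines headers : List String) (i : Nat) (hi : i < lines.length) :
    pvSec lines headers i =
      if pvHeadA headers (PySem.Chars.strip lines[i].toList) then
        some (i + 1, pvFS lines (i + 1))
      else pvSec lines headers (i + 1) := by
  unfold pvSec
  rw [List.drop_eq_getElem_cons hi, List.findIdx?_cons]
  by_cases h : pvHeadA headers (PySem.Chars.strip lines[i].toList) = true
  · simp [h]
  · simp only [Bool.not_eq_true] at h
    simp only [h, Bool.false_eq_true, if_false]
    cases hf : (lines.drop (i + 1)).findIdx? (fun l => pvHeadA headers (PySem.Chars.strip l.toList)) with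
    | none => simp
    | some k =>
      simp only []
      exact congrArg some (by rw [show i + 1 + k + 1 = i + (k + 1) + 1 from by omega])

-- loop invariant for the backward scan
theorem pvLoopB_spec (lines headers : List String) :
    ∀ i, i ≤ lines.length →
      pvLoopB lines (pvVariants headers) i (pvFS lines i) (pvSec lines headers i) =
        pvSec lines headers 0 := by
  intro i
  induction i with
  | zero => intro _; rfl
  | succ i ih =>
    intro hle
    have hi : i < lines.length := by omega
    simp only [pvLoopB, List.getD_eq_getElem lines "" hi]
    rw [contains_variants]
    have hstop : pvStopB (PySem.Chars.strip lines[i].toList) =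
        pvStopA (PySem.Chars.strip lines[i].toList) := (pvStopA_eq_pvStopB _).symm
    rw [hstop, ← pvSec_step lines headers i hi, ← pvFS_step lines i hi]
    exact ih (by omega)

-- the in-section phase of A's loop takes lines up to the first stop line
theorem pvLoopA_true (headers : List String) (rest res : List String) :
    pvLoopA headers rest true res =
      res.reverse ++ rest.takeWhile (fun l => !pvStopA (PySem.Chars.strip l.toList)) := by
  induction rest generalizing res with
  | nil => simp [pvLoopA]
  | cons l t ih =>
    by_cases h : pvStopA (PySem.Chars.strip l.toList) = true
    · simp [pvLoopA, h]
    · simp only [Bool.not_eq_true] at h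
      simp [pvLoopA, h, ih]

-- the searching phase of A's loop, characterised by findIdx?
theorem pvLoopA_false (headers : List String) (lines : List String) :
    pvLoopA headers lines false [] =
      match lines.findIdx? (fun l => pvHeadA headers (PySem.Chars.strip l.toList)) with
      | none => []
      | some i => (lines.drop (i + 1)).takeWhile (fun l => !pvStopA (PySem.Chars.strip l.toList)) := by
  induction lines with
  | nil => simp [pvLoopA]
  | cons l t ih =>
    by_cases h : pvHeadA headers (PySem.Chars.strip l.toList) = true
    · simp [pvLoopA, h, List.findIdx?_cons, pvLoopA_true]
    · simp only [Bool.not_eq_true] at h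
      simp only [pvLoopA, h, List.findIdx?_cons, Bool.false_eq_true, if_false, ih]
      cases t.findIdx? (fun l => pvHeadA headers (PySem.Chars.strip l.toList)) with
      | none => simp
      | some i => simp [List.drop_succ_cons]

-- take-to-first-hit equals takeWhile-not
theorem take_findIdx?_eq_takeWhile {α : Type} (p : α → Bool) (xs : List α) :
    (match xs.findIdx? p with | none => xs | some j => xs.take j) =
      xs.takeWhile (fun x => !p x) := by
  induction xs with
  | nil => simp
  | cons a t ih =>
    by_cases h : p a = true
    · simp [List.findIdx?_cons, h]
    · simp only [Bool.not_eq_true] at h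
      simp only [List.findIdx?_cons, h, Bool.false_eq_true, if_false, List.takeWhile_cons,
        Bool.not_false, if_true]
      cases hf : t.findIdx? p with
      | none => simpa [hf] using ih
      | some j => simpa [hf] using ih

-- ===== VERDICT (by name: the statement is the Claim_ definition above) =====
theorem extract_header_section_py_spec : Claim_equal_extract_header_section_py := by
  intro lines headers _
  unfold Spec_extract_header_section_py extract_header_section_py extract_header_section_py_alt
  rw [pvLoopA_false]
  have hB : pvLoopB lines (pvVariants headers) lines.length lines.length none =
      pvSec lines headers 0 := by
    have h0 : pvFS lines lines.length = lines.length := by unfold pvFS; simp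
    have h1 : pvSec lines headers lines.length = none := by unfold pvSec; simp
    have := pvLoopB_spec lines headers lines.length (le_refl _)
    rw [h0, h1] at this
    exact this
  simp only [hB]
  unfold pvSec
  simp only [List.drop_zero, Nat.zero_add]
  cases hf : lines.findIdx? (fun l => pvHeadA headers (PySem.Chars.strip l.toList)) with
  | none => rfl
  | some start =>
    simp only
    congr 2
    unfold pvFS
    cases hg : (lines.drop (start + 1)).findIdx? (fun l => pvStopA (PySem.Chars.strip l.toList)) with
    | none =>
      simp only
      rw [PySem.List.slice_natCast]
      have := take_findIdx?_eq_takeWhile (fun l => pvStopA (PySem.Chars.strip l.toList)) (lines.drop (start + 1))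
      rw [hg] at this
      rw [← this]
      exact (List.take_of_length_le (by simp)).symm
    | some j =>
      simp only
      rw [PySem.List.slice_natCast]
      have := take_findIdx?_eq_takeWhile (fun l => pvStopA (PySem.Chars.strip l.toList)) (lines.drop (start + 1))
      rw [hg] at this
      rw [← this]
      have h2 : start + 1 + j - (start + 1) = j := by omega
      rw [h2]
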